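-- pv_equiv track=rewrite | github.com/utcq/ngcVpy | ngc/compiler/compiler.py | __strbytes__
-- ===== SOURCE A (Python) =====
-- from math import ceil
--
-- def __strbytes__(string:str):
--     values = list(range(0, ceil(len(string)/4)))
--     vindex = 0
--
--
--     for i in range(0,ceil(len(string)/4)):
--         values[i] = ""
--
--     for i in range(0,len(string)):
--         if (i!=0 and i%4 < 1): vindex+=1
--         values[vindex] += str(string[i])
--
--     for i in range(0,ceil(len(string)/4)):
--         val = ''.join(list(reversed(values[i])))
--         res = "0x"
--         for char in val:
--             res+=hex(ord(char))[2:]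
--         res += "; " + val
--         values[i] = res
--     values = list(reversed(values))
--     return values
-- ===== SOURCE B (Python) =====
-- def __strbytes__(string: str):
--     res = []
--     for i in range(0, len(string), 4):
--         rev = string[i:i+4][::-1]
--         res.append("0x" + "".join(format(ord(c), "x") for c in rev) + "; " + rev)
--     return res[::-1]
-- ===== Notes on version B (the rewrite author's own statement) =====
-- stated objective: simpler
-- what changed: Replaces A's three passes (bucket pre-initialization, per-character distribution via a vindex counter, and a per-bucket rewrite followed by a list reversal) by a single slice-driven loop over the chunk starts that builds each hex-plus-reversed-chunk entry in one expression.
import Mathlib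
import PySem

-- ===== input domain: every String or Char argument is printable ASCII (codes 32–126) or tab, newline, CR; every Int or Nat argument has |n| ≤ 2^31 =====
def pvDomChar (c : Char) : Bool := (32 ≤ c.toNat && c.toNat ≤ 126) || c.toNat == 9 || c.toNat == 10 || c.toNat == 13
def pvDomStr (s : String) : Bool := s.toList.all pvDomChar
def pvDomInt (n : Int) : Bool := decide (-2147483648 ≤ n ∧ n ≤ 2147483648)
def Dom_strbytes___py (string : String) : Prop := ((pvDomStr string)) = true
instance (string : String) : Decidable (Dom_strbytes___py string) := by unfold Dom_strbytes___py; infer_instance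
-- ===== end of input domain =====

-- B replaces A's three index-counter passes (pre-init, per-character vindex distribution,
-- per-bucket rewrite + final reverse) by one slice-driven pass over the chunk starts; objective: simpler.

-- shared helper: hex(n)[2:] / format(n, 'x') for n ≥ 0 (lowercase hex digits, no prefix, no padding)
def pyHexDigit (n : Nat) : Char :=
  if n < 10 then Char.ofNat (48 + n) else Char.ofNat (87 + n)

def pyHexDigits (n : Nat) : List Char :=
  if n < 16 then [pyHexDigit n]
  else pyHexDigits (n / 16) ++ [pyHexDigit (n % 16)]
decreasing_by exact Nat.div_lt_self (by omega) (by omega)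

-- ===== PORT A =====
-- values = list(range(0, ceil(n/4))) followed by the loop overwriting every slot with ""
-- is ported as the list of ceil(n/4) empty strings (buckets kept as List Char; ceil(n/4) = (n+3)/4).
def strbytes___py (string : String) : List String :=
  let cs := string.toList
  let n := cs.length
  let m := (n + 3) / 4
  let values : List (List Char) := (List.range m).map (fun _ => ([] : List Char))
  -- for i in range(0, len(string)): if (i!=0 and i%4 < 1): vindex+=1; values[vindex] += str(string[i])
  let st := (List.range n).foldl
      (fun (st : List (List Char) × Nat) i =>
        let vx := if i ≠ 0 ∧ i % 4 < 1 then st.2 + 1 else st.2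
        (st.1.set vx (st.1.getD vx [] ++ [cs.getD i ' ']), vx))
      (values, 0)
  -- for i in range(0, ceil(n/4)): val = ''.join(reversed(values[i])); res = "0x"; for char in val: res += hex(ord(char))[2:]; res += "; " + val
  let values2 := st.1.map (fun v =>
      let val := v.reverse
      let res := "0x".toList
      let res := val.foldl (fun r c => r ++ pyHexDigits c.toNat) res
      String.mk (res ++ "; ".toList ++ val))
  values2.reverse

-- ===== PORT B =====
def strbytes___py_alt (string : String) : List String :=
  let cs := string.toList
  let res := (PySem.List.pyRange 0 cs.length 4).foldl
      (fun (acc : List String) i =>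
        let rev := (PySem.List.slice cs (some i) (some (i + 4))).reverse
        acc ++ [String.mk ("0x".toList ++ rev.flatMap (fun c => pyHexDigits c.toNat)
                           ++ "; ".toList ++ rev)])
      []
  res.reverse

-- ===== PRECONDITION & SPEC =====
def Spec_strbytes___py (string : String) (out : List String) : Prop := out = strbytes___py_alt string
instance (string : String) (out : List String) : Decidable (Spec_strbytes___py string out) := by unfold Spec_strbytes___py; infer_instance

-- ===== CLAIM (what is proved, stated in full; the proofs are below) =====
def Claim_equal_strbytes___py : Prop := ∀ (string : String), Dom_strbytes___py string → Spec_strbytes___py string (strbytes___py string)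

-- ===== LEMMAS AND PROOFS =====

lemma strbytes_flatMap_singleton {α β : Type} (g : α → β) (l : List α) :
    l.flatMap (fun x => [g x]) = l.map g := by
  induction l <;> simp_all

-- A's distribution loop: after j characters, vindex = (j-1)/4 and bucket k holds chars 4k..4k+3 of the first j.
lemma strbytes_loopA_inv (cs : List Char) (j : Nat) (hj : j ≤ cs.length) :
    (List.range j).foldl
      (fun (st : List (List Char) × Nat) i =>
        let vx := if i ≠ 0 ∧ i % 4 < 1 then st.2 + 1 else st.2
        (st.1.set vx (st.1.getD vx [] ++ [cs.getD i ' ']), vx))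
      ((List.range ((cs.length + 3) / 4)).map (fun _ => ([] : List Char)), 0)
    = ((List.range ((cs.length + 3) / 4)).map
        (fun k => (cs.drop (4 * k)).take (min 4 (j - 4 * k))), (j - 1) / 4) := by
  induction j with
  | zero => simp
  | succ j ih =>
    rw [List.range_succ, List.foldl_append, ih (by omega)]
    simp only [List.foldl_cons, List.foldl_nil]
    have hjm : j / 4 < (cs.length + 3) / 4 := by omega
    have hvx : (if j ≠ 0 ∧ j % 4 < 1 then (j - 1) / 4 + 1 else (j - 1) / 4) = j / 4 := by
      split <;> omega
    rw [hvx]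
    refine Prod.ext ?_ (by simp)
    apply List.ext_getElem (by simp)
    intro i hi _
    simp only [List.length_set, List.length_map, List.length_range] at hi
    rw [List.getElem_set]
    have hget : ((List.range ((cs.length + 3) / 4)).map
        (fun k => (cs.drop (4 * k)).take (min 4 (j - 4 * k)))).getD (j / 4) []
        = (cs.drop (4 * (j / 4))).take (min 4 (j - 4 * (j / 4))) := by
      rw [List.getD_eq_getElem?_getD, List.getElem?_map, List.getElem?_range hjm]
      rfl
    by_cases h : j / 4 = i
    · subst h
      simp only [hget, List.getElem_map, List.getElem_range]
      have h1 : min 4 (j - 4 * (j / 4)) = j - 4 * (j / 4) := by omega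
      have h2 : min 4 (j + 1 - 4 * (j / 4)) = (j - 4 * (j / 4)) + 1 := by omega
      rw [h1, h2, List.take_add_one]
      congr 1
      rw [List.getElem?_drop]
      have hlt : 4 * (j / 4) + (j - 4 * (j / 4)) = j := by omega
      rw [hlt, List.getElem?_eq_getElem (by omega : j < cs.length)]
      · simp [List.getD_eq_getElem?_getD, List.getElem?_eq_getElem (by omega : j < cs.length)]
    · simp only [if_neg h, List.getElem_map, List.getElem_range]
      congr 1
      omega

lemma strbytes_pyRange04 (n : Nat) :
    PySem.List.pyRange 0 (n : Int) 4 = (List.range ((n + 3) / 4)).map (fun k => (4 * (k : Nat) : Int)) := by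
  rw [PySem.List.pyRange_of_pos _ _ (by norm_num)]
  by_cases h : (0 : Int) < (n : Int)
  · rw [if_pos h]
    have : (((n : Int) - 0 + 4 - 1) / 4).toNat = (n + 3) / 4 := by omega
    rw [this]
    exact List.map_congr_left (fun k _ => by push_cast; ring)
  · rw [if_neg h]
    have : n = 0 := by omega
    subst this; simp

-- ===== VERDICT (by name: the statement is the Claim_ definition above) =====
theorem strbytes___py_spec : Claim_equal_strbytes___py := by
  intro s _
  unfold Spec_strbytes___py strbytes___py strbytes___py_alt
  simp only []
  set cs := s.toList with hcs
  rw [strbytes_loopA_inv cs cs.length le_rfl]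
  rw [strbytes_pyRange04 cs.length]
  rw [List.foldl_map, PySem.List.foldl_append_eq_flatMap
        (fun (k : Nat) => [String.mk ("0x".toList
          ++ ((PySem.List.slice cs (some (4 * (k : Nat) : Int)) (some ((4 * (k : Nat) : Int) + 4))).reverse).flatMap (fun c => pyHexDigits c.toNat)
          ++ "; ".toList ++ (PySem.List.slice cs (some (4 * (k : Nat) : Int)) (some ((4 * (k : Nat) : Int) + 4))).reverse)])]
  simp only [strbytes_flatMap_singleton, List.nil_append, List.map_map]
  congr 1
  apply List.map_congr_left
  intro k _
  have hs : PySem.List.slice cs (some (4 * (k : Nat) : Int)) (some ((4 * (k : Nat) : Int) + 4))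
      = (cs.drop (4 * k)).take 4 := by
    have := PySem.List.slice_natCast_add cs (4 * k) 4
    push_cast at this ⊢
    exact this
  have htk : (cs.drop (4 * k)).take (min 4 (cs.length - 4 * k)) = (cs.drop (4 * k)).take 4 := by
    rcases le_or_gt 4 (cs.length - 4 * k) with h | h
    · rw [min_eq_left h]
    · rw [min_eq_right (by omega), List.take_of_length_le (by simp), List.take_of_length_le (by simp; omega)]
  simp only [Function.comp, hs, htk]
  rw [PySem.List.foldl_append_eq_flatMap (fun c => pyHexDigits c.toNat)
        ((List.take 4 (List.drop (4 * k) cs)).reverse) "0x".toList]
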